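-- pv_equiv track=rewrite | github.com/rrmerugu-archive/django-solr-rest-apis | django_solr_rest_apis/views.py | convert_facets_field_to_dict
-- ===== SOURCE A (Python) =====
-- def convert_facets_field_to_dict(data):
--     data_cleaned = []
--     first = True
--     first_word = None
--     for i, k in enumerate(data):
--         if first:
--             first_word = k
--             first = False
--         else:
--             d = {
--                 first_word: k
--             }
--             data_cleaned.append(d)
--             first_word = None
--             first = True
--     return data_cleaned
-- ===== SOURCE B (Python) =====
-- def convert_facets_field_to_dict(data):
--     keys = data[0::2]
--     values = data[1::2]
--     return [{k: v} for k, v in zip(keys, values)]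
-- ===== Notes on version B (the rewrite author's own statement) =====
-- stated objective: idiomatic
-- what changed: Replaces the single-pass toggle-flag loop with mutable state by staged passes: slice out the even-index elements (keys) and odd-index elements (values) and zip the two slices into single-key dicts.
import Mathlib
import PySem

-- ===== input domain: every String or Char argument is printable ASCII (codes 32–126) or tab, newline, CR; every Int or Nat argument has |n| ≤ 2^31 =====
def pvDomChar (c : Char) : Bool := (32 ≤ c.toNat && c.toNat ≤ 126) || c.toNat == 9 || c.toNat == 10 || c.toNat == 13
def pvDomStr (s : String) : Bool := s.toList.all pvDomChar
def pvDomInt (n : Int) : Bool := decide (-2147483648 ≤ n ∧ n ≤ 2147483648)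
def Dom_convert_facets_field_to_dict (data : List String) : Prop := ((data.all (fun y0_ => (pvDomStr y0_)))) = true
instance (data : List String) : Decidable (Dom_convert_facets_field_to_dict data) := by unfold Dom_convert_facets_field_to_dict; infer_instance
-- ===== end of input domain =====

-- B replaces A's stateful toggle-flag loop by staged slicing: keys = data[0::2], values = data[1::2], zipped into single-key dicts (idiomatic; same cost).

-- ===== PORT A =====
-- Python loop state: (data_cleaned, first, first_word); the 'i' of enumerate is unused.
def convert_facets_field_to_dict (data : List String) : List (List (String × String)) :=
  (data.foldl
    (fun (st : List (List (String × String)) × Bool × Option String) k =>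
      if st.2.1 then
        (st.1, false, some k)
      else
        (st.1 ++ [[(st.2.2.getD "", k)]], true, none))
    ([], true, none)).1

-- ===== PORT B =====
-- Source B: keys = data[0::2]; values = data[1::2]; [{k: v} for k, v in zip(keys, values)].
-- slice? returns some here (step 2 ≠ 0); getD [] merely extracts that value.
def convert_facets_field_to_dict_alt (data : List String) : List (List (String × String)) :=
  let keys := (PySem.List.slice? data none none 2).getD []
  let values := (PySem.List.slice? data (some 1) none 2).getD []
  (keys.zip values).map (fun kv => [(kv.1, kv.2)])

-- ===== PRECONDITION & SPEC =====
def Spec_convert_facets_field_to_dict (data : List String) (out : List (List (String × String))) : Prop := out = convert_facets_field_to_dict_alt data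
instance (data : List String) (out : List (List (String × String))) : Decidable (Spec_convert_facets_field_to_dict data out) := by unfold Spec_convert_facets_field_to_dict; infer_instance

-- ===== CLAIM (what is proved, stated in full; the proofs are below) =====
def Claim_equal_convert_facets_field_to_dict : Prop := ∀ (data : List String), Dom_convert_facets_field_to_dict data → Spec_convert_facets_field_to_dict data (convert_facets_field_to_dict data)

-- ===== LEMMAS AND PROOFS =====

-- Reference pairing both ports are reduced to: consecutive disjoint pairs, trailing element dropped.
def pvPairs {α : Type} : List α → List (α × α)
  | a :: b :: rest => (a, b) :: pvPairs rest
  | _ => []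

-- Even-index elements xs[0::2].
def pvEvens {α : Type} : List α → List α
  | [] => []
  | [a] => [a]
  | a :: _ :: rest => a :: pvEvens rest

theorem pvEvens_cons_tail {α : Type} (b : α) (rest : List α) :
    pvEvens (b :: rest) = b :: pvEvens rest.tail := by
  cases rest <;> rfl

theorem pvEvens_as_filterMap {α : Type} (xs : List α) :
    (List.range ((xs.length + 1) / 2)).filterMap (fun k => xs[2 * k]?) = pvEvens xs := by
  match xs with
  | [] => simp [pvEvens]
  | [a] => simp [pvEvens, List.range_succ]
  | a :: b :: rest =>
    have ih := pvEvens_as_filterMap rest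
    have hlen : ((a :: b :: rest).length + 1) / 2 = (rest.length + 1) / 2 + 1 := by
      simp; omega
    rw [hlen, List.range_succ_eq_map, List.filterMap_cons, List.filterMap_map]
    have hf : ((fun k => (a :: b :: rest)[2 * k]?) ∘ Nat.succ) = fun k => rest[2 * k]? := by
      funext k
      show (a :: b :: rest)[2 * (k + 1)]? = rest[2 * k]?
      rw [show 2 * (k + 1) = 2 * k + 1 + 1 by ring]
      simp
    rw [hf, ih]
    simp [pvEvens]
termination_by xs.length

theorem pvOdds_as_filterMap {α : Type} (xs : List α) :
    (List.range (xs.length / 2)).filterMap (fun k => xs[2 * k + 1]?) = pvEvens xs.tail := by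
  match xs with
  | [] => simp [pvEvens]
  | [a] => simp [pvEvens]
  | a :: b :: rest =>
    have ih := pvOdds_as_filterMap rest
    have hlen : (a :: b :: rest).length / 2 = rest.length / 2 + 1 := by simp; omega
    rw [hlen, List.range_succ_eq_map, List.filterMap_cons, List.filterMap_map]
    have hf : ((fun k => (a :: b :: rest)[2 * k + 1]?) ∘ Nat.succ) = fun k => rest[2 * k + 1]? := by
      funext k
      show (a :: b :: rest)[2 * (k + 1) + 1]? = rest[2 * k + 1]?
      rw [show 2 * (k + 1) + 1 = 2 * k + 1 + 1 + 1 by ring]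
      simp
    rw [hf, ih, List.tail_cons, pvEvens_cons_tail]
    simp
termination_by xs.length

theorem slice2_keys {α : Type} (xs : List α) :
    PySem.List.slice? xs none none 2 = some (pvEvens xs) := by
  simp only [PySem.List.slice?, PySem.List.sliceIndices]
  norm_num
  rw [← pvEvens_as_filterMap xs]
  have hfun : (fun k : Nat => xs[((2 : Int) * (k : Int)).toNat]?) = fun k => xs[2 * k]? := by
    funext k
    rw [show ((2 : Int) * (k : Int)).toNat = 2 * k by omega]
  split_ifs with h
  · have hcount : (((xs.length : Int) + 2 - 1) / 2).toNat = (xs.length + 1) / 2 := by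
      omega
    rw [hcount, hfun]
  · have hx : xs.length = 0 := by
      by_contra hne
      exact h (by exact_mod_cast Nat.pos_of_ne_zero hne)
    rw [show (xs.length + 1) / 2 = 0 by omega]
    simp

theorem slice2_vals {α : Type} (xs : List α) :
    PySem.List.slice? xs (some 1) none 2 = some (pvEvens xs.tail) := by
  simp only [PySem.List.slice?, PySem.List.sliceIndices]
  norm_num
  by_cases h0 : xs.length = 0
  · rw [← pvOdds_as_filterMap xs, h0]
    norm_num
  · have hmin : min (1 : Int) (xs.length : Int) = 1 := by
      have : (1 : Int) ≤ (xs.length : Int) := by exact_mod_cast Nat.one_le_iff_ne_zero.mpr h0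
      omega
    rw [hmin, ← pvOdds_as_filterMap xs]
    have hfun : (fun k : Nat => xs[(1 + 2 * (k : Int)).toNat]?) = fun k => xs[2 * k + 1]? := by
      funext k
      rw [show ((1 : Int) + 2 * (k : Int)).toNat = 2 * k + 1 by omega]
    split_ifs with h
    · have hcount : (((xs.length : Int) - 1 + 2 - 1) / 2).toNat = xs.length / 2 := by
        omega
      rw [hcount, hfun]
    · have hx : xs.length = 1 := by omega
      rw [show xs.length / 2 = 0 by omega]
      simp

-- B's zip of the two slices is exactly the consecutive pairing.
theorem zip_evens_odds {α : Type} (xs : List α) :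
    (pvEvens xs).zip (pvEvens xs.tail) = pvPairs xs := by
  match xs with
  | [] => rfl
  | [a] => rfl
  | a :: b :: rest =>
    have ih := zip_evens_odds rest
    simp only [List.tail_cons, pvEvens, pvPairs, pvEvens_cons_tail, List.zip_cons_cons, ih]
termination_by xs.length

theorem alt_eq_pairs (data : List String) :
    convert_facets_field_to_dict_alt data = (pvPairs data).map (fun kv => [(kv.1, kv.2)]) := by
  unfold convert_facets_field_to_dict_alt
  rw [slice2_keys, slice2_vals]
  simp [zip_evens_odds]

-- Loop invariant for A: starting in the "first = true" state with accumulator acc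
-- appends exactly the consecutive pairing of the remaining list.
theorem foldA_invariant (l : List String) :
    ∀ acc : List (List (String × String)),
      (l.foldl
        (fun (st : List (List (String × String)) × Bool × Option String) k =>
          if st.2.1 then
            (st.1, false, some k)
          else
            (st.1 ++ [[(st.2.2.getD "", k)]], true, none))
        (acc, true, none)).1 = acc ++ (pvPairs l).map (fun kv => [(kv.1, kv.2)]) := by
  match l with
  | [] => intro acc; simp [pvPairs]
  | [a] => intro acc; simp [pvPairs, List.foldl]
  | a :: b :: rest =>
    intro acc
    have ih := foldA_invariant rest
    simp only [List.foldl, if_pos, if_neg, Bool.false_eq_true, not_false_iff,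
      pvPairs, Option.getD_some]
    rw [ih]
    simp
termination_by l.length

-- ===== VERDICT (by name: the statement is the Claim_ definition above) =====
theorem convert_facets_field_to_dict_spec : Claim_equal_convert_facets_field_to_dict := by
  intro data _
  unfold Spec_convert_facets_field_to_dict convert_facets_field_to_dict
  rw [foldA_invariant, alt_eq_pairs]
  simp
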